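-- pv_equiv track=rewrite | github.com/pravesh-aryal/bagh_chal | bagh_chal/game_mechanics.py | points_for_lines
-- ===== SOURCE A (Python) =====
-- def points_for_lines(coordinates) -> tuple:
--     vertical_coordinates, horizontal_coordinates = [], []
--     index = 0
--     for each_row in coordinates:
--         vertical_coordinates.append((each_row[0], each_row[len(each_row) - 1]))
--     for i in range(0, 5):
--         _ = []
--         for each_row in coordinates:
--             _.append(each_row[index])
--
--         horizontal_coordinates.append(_)
--         index += 1
--
--     return vertical_coordinates, horizontal_coordinates
-- ===== SOURCE B (Python) =====
-- def points_for_lines(coordinates) -> tuple: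
--     vertical = []
--     horizontal = [[] for _ in range(5)]
--     for row in coordinates:
--         vertical.append((row[0], row[-1]))
--         horizontal = [horizontal[i] + [row[i]] for i in range(5)]
--     return vertical, horizontal
-- ===== Notes on version B (the rewrite author's own statement) =====
-- stated objective: alternative
-- what changed: Single pass over the rows that builds the endpoint pairs and the five column lists together (row-major transpose with pre-initialized columns), replacing A's two separate passes with a column-major nested scan.
import Mathlib
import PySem

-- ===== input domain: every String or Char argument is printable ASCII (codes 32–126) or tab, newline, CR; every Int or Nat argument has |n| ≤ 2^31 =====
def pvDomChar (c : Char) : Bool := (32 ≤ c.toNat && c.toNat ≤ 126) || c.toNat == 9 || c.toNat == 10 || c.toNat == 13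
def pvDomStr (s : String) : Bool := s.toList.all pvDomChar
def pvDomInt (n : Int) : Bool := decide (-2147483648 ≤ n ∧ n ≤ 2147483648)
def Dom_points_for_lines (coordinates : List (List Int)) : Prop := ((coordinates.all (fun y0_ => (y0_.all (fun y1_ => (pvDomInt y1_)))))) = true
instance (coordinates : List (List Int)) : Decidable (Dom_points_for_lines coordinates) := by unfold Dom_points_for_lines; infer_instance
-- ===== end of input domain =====

-- B builds the endpoint pairs and the five column lists in ONE pass over the rows (pre-initialized
-- columns, row-major transpose) instead of A's two passes with a column-major nested scan; return values only, no mutation issues.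

-- ===== PORT A =====
-- each_row[k] is ported with pyGetD (total form); Pre_ guarantees every index is in range.
def points_for_lines (coordinates : List (List Int)) : (List (Int × Int)) × List (List Int) :=
  let vertical := coordinates.foldl
    (fun acc row => acc ++ [(PySem.List.pyGetD row 0 0, PySem.List.pyGetD row (PySem.List.len row - 1) 0)]) []
  let st := (PySem.List.pyRange 0 5 1).foldl
    (fun (p : List (List Int) × Int) _i =>
      let col := coordinates.foldl (fun c row => c ++ [PySem.List.pyGetD row p.2 0]) []
      (p.1 ++ [col], p.2 + 1)) ([], 0)
  (vertical, st.1)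

-- ===== PORT B =====
def points_for_lines_alt (coordinates : List (List Int)) : (List (Int × Int)) × List (List Int) :=
  coordinates.foldl
    (fun (st : List (Int × Int) × List (List Int)) row =>
      (st.1 ++ [(PySem.List.pyGetD row 0 0, PySem.List.pyGetD row (-1) 0)],
       (PySem.List.pyRange 0 5 1).map
         (fun i => PySem.List.pyGetD st.2 i [] ++ [PySem.List.pyGetD row i 0])))
    ([], [[], [], [], [], []])

-- ===== PRECONDITION & SPEC =====
-- Pre_ excludes exactly the inputs where A raises IndexError: some row shorter than 5
-- (each_row[index] for index up to 4, and each_row[0] on an empty row).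
def Pre_points_for_lines (coordinates : List (List Int)) : Prop :=
  ∀ row ∈ coordinates, 5 ≤ row.length
instance (coordinates : List (List Int)) : Decidable (Pre_points_for_lines coordinates) := by
  unfold Pre_points_for_lines; infer_instance
def pvWitness_points_for_lines : List (List Int) := [[1, 2, 3, 4, 5]]

def Spec_points_for_lines (coordinates : List (List Int)) (out : (List (Int × Int)) × List (List Int)) : Prop := out = points_for_lines_alt coordinates
instance (coordinates : List (List Int)) (out : (List (Int × Int)) × List (List Int)) : Decidable (Spec_points_for_lines coordinates out) := by unfold Spec_points_for_lines; infer_instance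

-- ===== CLAIM (what is proved, stated in full; the proofs are below) =====
def Claim_equal_points_for_lines : Prop := ∀ (coordinates : List (List Int)), Dom_points_for_lines coordinates → Pre_points_for_lines coordinates → Spec_points_for_lines coordinates (points_for_lines coordinates)

-- ===== LEMMAS AND PROOFS =====

-- the i-th column of the grid
def pvCol (i : Int) (coordinates : List (List Int)) : List Int :=
  coordinates.map (fun row => PySem.List.pyGetD row i 0)

lemma pvCol_cons (i : Int) (r : List Int) (cs : List (List Int)) :
    pvCol i (r :: cs) = PySem.List.pyGetD r i 0 :: pvCol i cs := rfl

-- B's per-row update with the range(5) comprehension expanded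
def pvStep (st : List (Int × Int) × List (List Int)) (row : List Int) :
    List (Int × Int) × List (List Int) :=
  (st.1 ++ [(PySem.List.pyGetD row 0 0, PySem.List.pyGetD row (-1) 0)],
   [PySem.List.pyGetD st.2 0 [] ++ [PySem.List.pyGetD row 0 0],
    PySem.List.pyGetD st.2 1 [] ++ [PySem.List.pyGetD row 1 0],
    PySem.List.pyGetD st.2 2 [] ++ [PySem.List.pyGetD row 2 0],
    PySem.List.pyGetD st.2 3 [] ++ [PySem.List.pyGetD row 3 0],
    PySem.List.pyGetD st.2 4 [] ++ [PySem.List.pyGetD row 4 0]])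

lemma alt_eq_fold_pvStep (coordinates : List (List Int)) :
    points_for_lines_alt coordinates =
      coordinates.foldl pvStep ([], [[], [], [], [], []]) := by
  rfl

-- A's value in closed form
lemma points_for_lines_eq (coordinates : List (List Int)) :
    points_for_lines coordinates =
      (coordinates.map (fun row => (PySem.List.pyGetD row 0 0, PySem.List.pyGetD row (PySem.List.len row - 1) 0)),
       [pvCol 0 coordinates, pvCol 1 coordinates, pvCol 2 coordinates, pvCol 3 coordinates, pvCol 4 coordinates]) := by
  have hr : PySem.List.pyRange 0 5 1 = [0, 1, 2, 3, 4] := by decide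
  simp only [points_for_lines, hr, PySem.List.foldl_append_singleton_eq_map, pvCol]
  simp

-- B's loop invariant: one pass over the rows extends the pairs and all five columns at once
lemma points_for_lines_alt_inv (coordinates : List (List Int))
    (v : List (Int × Int)) (h0 h1 h2 h3 h4 : List Int) :
    coordinates.foldl pvStep (v, [h0, h1, h2, h3, h4]) =
      (v ++ coordinates.map (fun row => (PySem.List.pyGetD row 0 0, PySem.List.pyGetD row (-1) 0)),
       [h0 ++ pvCol 0 coordinates, h1 ++ pvCol 1 coordinates, h2 ++ pvCol 2 coordinates,
        h3 ++ pvCol 3 coordinates, h4 ++ pvCol 4 coordinates]) := by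
  induction coordinates generalizing v h0 h1 h2 h3 h4 with
  | nil => simp [pvCol]
  | cons r cs ih =>
      have hst : pvStep (v, [h0, h1, h2, h3, h4]) r =
          (v ++ [(PySem.List.pyGetD r 0 0, PySem.List.pyGetD r (-1) 0)],
           [h0 ++ [PySem.List.pyGetD r 0 0], h1 ++ [PySem.List.pyGetD r 1 0],
            h2 ++ [PySem.List.pyGetD r 2 0], h3 ++ [PySem.List.pyGetD r 3 0],
            h4 ++ [PySem.List.pyGetD r 4 0]]) := rfl
      rw [List.foldl_cons, hst, ih]
      simp [pvCol_cons]

-- on a row of length ≥ 5, row[-1] and row[len(row)-1] agree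
lemma last_index_eq (row : List Int) (h : 5 ≤ row.length) :
    PySem.List.pyGetD row (-1) 0 = PySem.List.pyGetD row (PySem.List.len row - 1) 0 := by
  rw [PySem.List.pyGetD_neg_ofNat row 1 0 (by omega) (by omega),
      PySem.List.pyGetD_eq_getElem row 0 (by simp only [PySem.List.len_eq]; omega)
        (by simp only [PySem.List.len_eq]; omega)]
  congr 1
  simp only [PySem.List.len_eq]
  omega

-- ===== VERDICT (by name: the statement is the Claim_ definition above) =====
theorem points_for_lines_spec : Claim_equal_points_for_lines := by
  intro coordinates _ hpre
  unfold Spec_points_for_lines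
  rw [alt_eq_fold_pvStep, points_for_lines_alt_inv coordinates [] [] [] [] [] [], points_for_lines_eq]
  simp only [List.nil_append]
  congr 1
  apply List.map_congr_left
  intro row hrow
  rw [last_index_eq row (hpre row hrow)]
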